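-- pv_equiv track=rewrite | github.com/pmbechard/CodingChallenges | LeetCode/Python/medium/resulting_string_after_adjacent_removals_3561.py | resultingString
-- ===== SOURCE A (Python) =====
-- def resultingString(s: str) -> str:
--     stack = []
--     for i in range(len(s)):
--         curr = s[i]
--         if not stack:
--             stack.append(curr)
--             continue
--         diff = abs(ord(curr) - ord(stack[-1]))
--         if diff == 1 or diff == 25:
--             stack.pop()
--         else:
--             stack.append(curr)
--     return ''.join(stack)
-- ===== SOURCE B (Python) =====
-- def resultingString(s: str) -> str:
--     t = list(s)
--     while True:
--         removed = False
--         for i in range(len(t) - 1):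
--             d = abs(ord(t[i]) - ord(t[i + 1]))
--             if d == 1 or d == 25:
--                 del t[i:i + 2]
--                 removed = True
--                 break
--         if not removed:
--             return ''.join(t)
-- ===== Notes on version B (the rewrite author's own statement) =====
-- stated objective: alternative
-- what changed: Replaces the single-pass stack with a repeated rescan that deletes the leftmost alphabet-adjacent (or wrap-around) pair and restarts until no pair remains.
import Mathlib
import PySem

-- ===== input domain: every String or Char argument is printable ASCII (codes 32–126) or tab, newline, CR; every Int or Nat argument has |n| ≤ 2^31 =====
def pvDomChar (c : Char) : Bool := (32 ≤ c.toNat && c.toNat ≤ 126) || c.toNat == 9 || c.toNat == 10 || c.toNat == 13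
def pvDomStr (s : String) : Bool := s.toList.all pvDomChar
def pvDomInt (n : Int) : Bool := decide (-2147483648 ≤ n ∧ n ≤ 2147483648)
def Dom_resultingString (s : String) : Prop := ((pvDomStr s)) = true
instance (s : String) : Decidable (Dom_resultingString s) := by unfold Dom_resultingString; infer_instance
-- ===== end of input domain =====

-- B replaces A's single-pass stack with a repeated leftmost-pair removal rescan; 'alternative' (not faster).

-- shared helper: abs(ord a - ord b) is 1 or 25
def pvMatch (a b : Char) : Bool :=
  let d := ((a.toNat : Int) - (b.toNat : Int)).natAbs
  d == 1 || d == 25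

-- ===== PORT A =====
-- literal step of A's loop body: empty-stack append, else compare with stack[-1]
def pvStepA (stack : List Char) (curr : Char) : List Char :=
  match stack.getLast? with
  | none => stack ++ [curr]
  | some top => if pvMatch curr top then stack.dropLast else stack ++ [curr]

def resultingString (s : String) : String :=
  String.mk (s.toList.foldl pvStepA [])

-- ===== PORT B =====
-- inner scan of Source B: first index i with a removable pair (t[i],t[i+1]); remove it
def pvRemFirst : List Char → Option (List Char)
  | a :: b :: t => if pvMatch a b then some t else (pvRemFirst (b :: t)).map (a :: ·)
  | _ => none

theorem pvRemFirst_length : ∀ (l l' : List Char), pvRemFirst l = some l' → l'.length < l.length := by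
  intro l
  induction l with
  | nil => intro l' h; simp [pvRemFirst] at h
  | cons a t ih =>
    intro l' h
    cases t with
    | nil => simp [pvRemFirst] at h
    | cons b u =>
      simp only [pvRemFirst] at h
      split at h
      · cases h; simp
      · simp only [Option.map_eq_some_iff] at h
        obtain ⟨m, hm, rfl⟩ := h
        have := ih m hm
        simp at this ⊢; omega

-- outer while-loop of Source B: repeat until no removable pair found
def pvNorm (l : List Char) : List Char :=
  match h : pvRemFirst l with
  | none => l
  | some l' => pvNorm l'
termination_by l.length
decreasing_by exact pvRemFirst_length _ _ h

def resultingString_alt (s : String) : String :=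
  String.mk (pvNorm s.toList)

-- ===== PRECONDITION & SPEC =====
def Spec_resultingString (s : String) (out : String) : Prop := out = resultingString_alt s
instance (s : String) (out : String) : Decidable (Spec_resultingString s out) := by unfold Spec_resultingString; infer_instance

-- ===== CLAIM (what is proved, stated in full; the proofs are below) =====
def Claim_equal_resultingString : Prop := ∀ (s : String), Dom_resultingString s → Spec_resultingString s (resultingString s)

-- ===== LEMMAS AND PROOFS =====

theorem pvMatch_comm (a b : Char) : pvMatch a b = pvMatch b a := by
  have h : ((a.toNat : Int) - (b.toNat : Int)).natAbs = ((b.toNat : Int) - (a.toNat : Int)).natAbs := by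
    omega
  simp [pvMatch, h]

theorem pvNorm_none {l : List Char} (h : pvRemFirst l = none) : pvNorm l = l := by
  rw [pvNorm]; split <;> simp_all

theorem pvNorm_some {l l' : List Char} (h : pvRemFirst l = some l') : pvNorm l = pvNorm l' := by
  rw [pvNorm]; split <;> simp_all

-- an irreducible list stays irreducible after dropping the last element
theorem pvRemFirst_dropLast : ∀ (l : List Char), pvRemFirst l = none → pvRemFirst l.dropLast = none := by
  intro l
  induction l with
  | nil => intro; simp [pvRemFirst]
  | cons a t ih =>
    intro h
    cases t with
    | nil => simp [pvRemFirst]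
    | cons b u =>
      simp only [pvRemFirst] at h
      split at h
      · exact absurd h (by simp)
      · rename_i hm
        have hbu : pvRemFirst (b :: u) = none := by
          cases hx : pvRemFirst (b :: u) with
          | none => rfl
          | some m => rw [hx] at h; simp at h
        have ihd := ih hbu
        have : (a :: b :: u).dropLast = a :: (b :: u).dropLast := by simp
        rw [this]
        cases u with
        | nil => simp [pvRemFirst]
        | cons c v =>
          have hd : (b :: c :: v).dropLast = b :: (c :: v).dropLast := by simp
          rw [hd] at ihd ⊢
          simp only [pvRemFirst, hm, ihd]
          simp

-- if st is irreducible and its last element matches c, the leftmost removable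
-- pair of st ++ c :: rest is that boundary pair
theorem pvRemFirst_boundary : ∀ (st : List Char) (top c : Char) (rest : List Char),
    pvRemFirst st = none → st.getLast? = some top → pvMatch top c = true →
    pvRemFirst (st ++ c :: rest) = some (st.dropLast ++ rest) := by
  intro st
  induction st with
  | nil => intro top c rest _ h; simp at h
  | cons a t ih =>
    intro top c rest hirr hlast hm
    cases t with
    | nil =>
      simp at hlast
      subst hlast
      simp [pvRemFirst, hm]
    | cons b u =>
      simp only [pvRemFirst] at hirr
      split at hirr
      · exact absurd hirr (by simp)
      · rename_i hab
        have hbu : pvRemFirst (b :: u) = none := by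
          cases hx : pvRemFirst (b :: u) with
          | none => rfl
          | some m => rw [hx] at hirr; simp at hirr
        have hlast' : (b :: u).getLast? = some top := by
          simpa [List.getLast?_cons_cons] using hlast
        have hrec := ih top c rest hbu hlast' hm
        have hrec' : pvRemFirst (b :: (u ++ c :: rest)) = some ((b :: u).dropLast ++ rest) := by
          simpa using hrec
        have hcons : (a :: b :: u) ++ c :: rest = a :: b :: (u ++ c :: rest) := by simp
        rw [hcons]
        simp only [pvRemFirst]
        rw [if_neg hab, hrec']
        simp

-- appending a non-matching character keeps irreducibility
theorem pvRemFirst_snoc : ∀ (st : List Char) (c : Char),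
    pvRemFirst st = none →
    (∀ top, st.getLast? = some top → pvMatch top c = false) →
    pvRemFirst (st ++ [c]) = none := by
  intro st
  induction st with
  | nil => intro c _ _; simp [pvRemFirst]
  | cons a t ih =>
    intro c hirr hns
    cases t with
    | nil =>
      have := hns a (by simp)
      simp [pvRemFirst, this]
    | cons b u =>
      simp only [pvRemFirst] at hirr
      split at hirr
      · exact absurd hirr (by simp)
      · rename_i hab
        have hbu : pvRemFirst (b :: u) = none := by
          cases hx : pvRemFirst (b :: u) with
          | none => rfl
          | some m => rw [hx] at hirr; simp at hirr
        have hns' : ∀ top, (b :: u).getLast? = some top → pvMatch top c = false := by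
          intro top h; exact hns top (by simpa [List.getLast?_cons_cons] using h)
        have hrec := ih c hbu hns'
        have hrec' : pvRemFirst (b :: (u ++ [c])) = none := by simpa using hrec
        have hcons : (a :: b :: u) ++ [c] = a :: b :: (u ++ [c]) := by simp
        rw [hcons]
        simp only [pvRemFirst]
        rw [if_neg hab, hrec']
        rfl

-- main invariant: from an irreducible stack st, A's fold over rest computes
-- B's normal form of st ++ rest
theorem pv_main : ∀ (rest st : List Char), pvRemFirst st = none →
    pvNorm (st ++ rest) = rest.foldl pvStepA st := by
  intro rest
  induction rest with
  | nil => intro st h; simpa using pvNorm_none h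
  | cons c rest ih =>
    intro st hirr
    simp only [List.foldl_cons]
    cases hlast : st.getLast? with
    | none =>
      have hst : st = [] := by
        cases st with
        | nil => rfl
        | cons x xs => simp at hlast
      subst hst
      have hstep : pvStepA [] c = [c] := by simp [pvStepA]
      rw [hstep]
      simpa using ih [c] (by simp [pvRemFirst])
    | some top =>
      by_cases hm : pvMatch c top = true
      · have hstep : pvStepA st c = st.dropLast := by simp [pvStepA, hlast, hm]
        rw [hstep]
        have hb := pvRemFirst_boundary st top c rest hirr hlast (by rw [pvMatch_comm]; exact hm)
        rw [pvNorm_some hb]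
        exact ih st.dropLast (pvRemFirst_dropLast st hirr)
      · have hstep : pvStepA st c = st ++ [c] := by simp [pvStepA, hlast, hm]
        rw [hstep]
        have hsnoc : pvRemFirst (st ++ [c]) = none := by
          apply pvRemFirst_snoc st c hirr
          intro top' h
          rw [hlast] at h
          cases h
          rw [pvMatch_comm]
          exact Bool.not_eq_true _ ▸ (by simpa using hm)
        have : st ++ c :: rest = (st ++ [c]) ++ rest := by simp
        rw [this]
        exact ih (st ++ [c]) hsnoc

-- ===== VERDICT (by name: the statement is the Claim_ definition above) =====
theorem resultingString_spec : Claim_equal_resultingString := by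
  intro s _
  unfold Spec_resultingString resultingString resultingString_alt
  rw [← pv_main s.toList [] (by simp [pvRemFirst])]
  simp
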